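-- pv_equiv track=rewrite | github.com/vnknowledge2014/file_translated_app | backend/app/agent/reconstructor/xlsx.py | _fix_formula_sheet_refs
-- ===== SOURCE A (Python) =====
-- def _safe_replace(t: str, search: str, replacement: str) -> str:
--     """Replace `search` in `t`, but skip occurrences preceded by ] (external refs)."""
--     out: list[str] = []
--     i = 0
--     while i < len(t):
--         idx = t.find(search, i)
--         if idx == -1:
--             out.append(t[i:])
--             break
--         if idx > 0 and t[idx - 1] == ']':
--             out.append(t[i:idx + len(search)])
--         else:
--             out.append(t[i:idx])
--             out.append(replacement)
--         i = idx + len(search)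
--     return ''.join(out)
--
-- def _fix_formula_sheet_refs(formula_text: str, sheet_name_map: dict[str, str]) -> str:
--     """Replace old sheet names in worksheet formulas.
--
--     Handles quoting for new names with spaces/symbols.
--     """
--     result = formula_text
--     for old, new in sorted(sheet_name_map.items(), key=lambda x: -len(x[0])):
--         result = _safe_replace(result, f"'{old}'!", f"'{new}'!")
--         if ' ' not in old and not any(c in old for c in "![\\'"):
--             needs_quotes = ' ' in new or any(c in new for c in r"![]''\"<>*+")
--             if needs_quotes:
--                 result = _safe_replace(result, f"{old}!", f"'{new}'!")
--             else:
--                 result = _safe_replace(result, f"{old}!", f"{new}!")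
--     return result
-- ===== SOURCE B (Python) =====
-- def _safe_replace(t: str, search: str, replacement: str) -> str:
--     """Split on `search` and rejoin: a gap keeps the literal `search` when the
--     piece before it ends with ] (external ref), else takes `replacement`."""
--     parts = t.split(search)
--     out: list[str] = []
--     for p in parts[:-1]:
--         out.append(p)
--         out.append(search if p.endswith(']') else replacement)
--     out.append(parts[-1])
--     return ''.join(out)
--
--
-- def _replacement_pairs(old: str, new: str) -> list[tuple[str, str]]:
--     pairs = [(f"'{old}'!", f"'{new}'!")]
--     if not any(c in old for c in " ![\\'"):
--         if any(c in new for c in " ![]''\\\"<>*+"):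
--             pairs.append((f"{old}!", f"'{new}'!"))
--         else:
--             pairs.append((f"{old}!", f"{new}!"))
--     return pairs
--
--
-- def _fix_formula_sheet_refs(formula_text: str, sheet_name_map: dict[str, str]) -> str:
--     result = formula_text
--     for old, new in sorted(sheet_name_map.items(), key=lambda x: -len(x[0])):
--         for search, repl in _replacement_pairs(old, new):
--             result = _safe_replace(result, search, repl)
--     return result
-- ===== Notes on version B (the rewrite author's own statement) =====
-- stated objective: simpler
-- what changed: The skip-aware replace is rebuilt on str.split: split on the search text once and rejoin the gaps (keeping the literal search after a piece ending in ']'), replacing A's manual index/find loop; the outer cascade is refactored into a _replacement_pairs helper driving one inner loop.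
import Mathlib
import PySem

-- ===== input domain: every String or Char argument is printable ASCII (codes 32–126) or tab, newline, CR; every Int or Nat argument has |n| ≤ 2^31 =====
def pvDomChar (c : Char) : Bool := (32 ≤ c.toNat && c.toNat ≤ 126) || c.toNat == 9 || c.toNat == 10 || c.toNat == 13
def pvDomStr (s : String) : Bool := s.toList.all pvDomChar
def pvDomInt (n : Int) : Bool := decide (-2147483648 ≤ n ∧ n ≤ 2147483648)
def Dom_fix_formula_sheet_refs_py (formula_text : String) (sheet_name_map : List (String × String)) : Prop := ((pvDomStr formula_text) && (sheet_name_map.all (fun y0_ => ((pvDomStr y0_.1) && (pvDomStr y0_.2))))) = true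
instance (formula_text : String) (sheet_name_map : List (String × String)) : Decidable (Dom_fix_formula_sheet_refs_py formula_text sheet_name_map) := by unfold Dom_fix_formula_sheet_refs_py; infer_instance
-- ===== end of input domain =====

-- B replaces A's manual index/find replacement loop by a split-on-the-search-text-and-rejoin pass
-- and refactors the quoting cascade into a pair-list helper; objective: simpler (same asymptotic cost).

-- ===== PORT A =====
-- _safe_replace: the while-loop over `i = t.find(search, i)`; fuel = len(t)+1 bounds the
-- iterations (each one advances i by at least len(search) ≥ 1 for the nonempty searches used here).
def pvFindLoop (t search repl : List Char) : Nat → Nat → List Char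
  | 0, _ => []
  | fuel+1, i =>
    if i < t.length then
      let idx := PySem.Chars.findFrom t search (i : Int)
      if idx = -1 then PySem.Chars.slice t (some (i : Int)) none
      else
        (if 0 < idx && (PySem.Chars.pyGet? t (idx - 1) == some ']') then
          PySem.Chars.slice t (some (i : Int)) (some (idx + search.length))
        else
          PySem.Chars.slice t (some (i : Int)) (some idx) ++ repl)
        ++ pvFindLoop t search repl fuel (idx + search.length).toNat
    else []

def pvSafeReplaceA (t search repl : String) : String :=
  String.ofList (pvFindLoop t.toList search.toList repl.toList (t.toList.length + 1) 0)

def fix_formula_sheet_refs_py (formula_text : String) (sheet_name_map : List (String × String)) : String :=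
  (PySem.List.sorted (PySem.Dict.ofList sheet_name_map).items
      (fun x => -(PySem.Str.len x.1))).foldl
    (fun result p =>
      let old := p.1
      let new := p.2
      let r1 := pvSafeReplaceA result ("'" ++ old ++ "'!") ("'" ++ new ++ "'!")
      if !PySem.Str.isIn " " old
          && !("![\\'".toList.any fun c => PySem.Chars.isIn [c] old.toList) then
        if PySem.Str.isIn " " new
            || ("![]''\\\"<>*+".toList.any fun c => PySem.Chars.isIn [c] new.toList) then
          pvSafeReplaceA r1 (old ++ "!") ("'" ++ new ++ "'!")
        else
          pvSafeReplaceA r1 (old ++ "!") (new ++ "!")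
      else r1)
    formula_text

-- ===== PORT B =====
-- Source B's loop 'for p in parts[:-1]: append p; append search-or-replacement' then 'append parts[-1]'.
def pvWalk (search repl : List Char) : List (List Char) → List Char
  | [] => []
  | [p] => p
  | p :: ps => p ++ (if PySem.Chars.endswith p [']'] then search else repl) ++ pvWalk search repl ps

def pvSafeReplaceAlt (t search repl : String) : String :=
  match PySem.Str.split? t search with
  | none => ""   -- t.split("") raises ValueError; unreachable: every search used ends in '!'
  | some parts => String.ofList (pvWalk search.toList repl.toList (parts.map String.toList))

def pvReplacementPairs (old new : String) : List (String × String) :=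
  let pairs := [("'" ++ old ++ "'!", "'" ++ new ++ "'!")]
  if !(" ![\\'".toList.any fun c => PySem.Chars.isIn [c] old.toList) then
    if (" ![]''\\\"<>*+".toList.any fun c => PySem.Chars.isIn [c] new.toList) then
      pairs ++ [(old ++ "!", "'" ++ new ++ "'!")]
    else
      pairs ++ [(old ++ "!", new ++ "!")]
  else pairs

def fix_formula_sheet_refs_py_alt (formula_text : String) (sheet_name_map : List (String × String)) : String :=
  (PySem.List.sorted (PySem.Dict.ofList sheet_name_map).items
      (fun x => -(PySem.Str.len x.1))).foldl
    (fun result p =>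
      (pvReplacementPairs p.1 p.2).foldl (fun r q => pvSafeReplaceAlt r q.1 q.2) result)
    formula_text

-- ===== PRECONDITION & SPEC =====
def Spec_fix_formula_sheet_refs_py (formula_text : String) (sheet_name_map : List (String × String)) (out : String) : Prop := out = fix_formula_sheet_refs_py_alt formula_text sheet_name_map
instance (formula_text : String) (sheet_name_map : List (String × String)) (out : String) : Decidable (Spec_fix_formula_sheet_refs_py formula_text sheet_name_map out) := by unfold Spec_fix_formula_sheet_refs_py; infer_instance

-- ===== CLAIM (what is proved, stated in full; the proofs are below) =====
def Claim_equal_fix_formula_sheet_refs_py : Prop := ∀ (formula_text : String) (sheet_name_map : List (String × String)), Dom_fix_formula_sheet_refs_py formula_text sheet_name_map → Spec_fix_formula_sheet_refs_py formula_text sheet_name_map (fix_formula_sheet_refs_py formula_text sheet_name_map)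

-- ===== LEMMAS AND PROOFS =====

-- A clean recursive description of Python's greedy left-to-right split (sep ≠ []).
def pvSplit (sep : List Char) (hs : sep ≠ []) (l : List Char) : List (List Char) :=
  if h : sep.isPrefixOf l then [] :: pvSplit sep hs (List.drop sep.length l)
  else
    match l with
    | [] => [[]]
    | c :: rest => (c :: (pvSplit sep hs rest).headI) :: (pvSplit sep hs rest).tail
termination_by l.length
decreasing_by
  · have hle := (List.isPrefixOf_iff_prefix.mp h).length_le
    have h1 : 1 ≤ sep.length := List.length_pos_iff.mpr hs
    simp only [List.length_drop]; omega
  · simp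

theorem pvSplit_ne_nil (sep : List Char) (hs : sep ≠ []) (l : List Char) :
    pvSplit sep hs l ≠ [] := by
  unfold pvSplit
  split
  · simp
  · split <;> simp

theorem go_nil (sep : List Char) (fuel : Nat) (cur : List Char) (acc : List (List Char)) :
    PySem.Chars.splitOn.go sep fuel [] cur acc = (cur.reverse :: acc).reverse := by
  rw [PySem.Chars.splitOn.go.eq_def]
  cases fuel <;> simp

theorem go_cons (sep : List Char) (fuel : Nat) (c : Char) (rest cur : List Char)
    (acc : List (List Char)) :
    PySem.Chars.splitOn.go sep (fuel+1) (c :: rest) cur acc =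
      if sep.isPrefixOf (c :: rest) then
        PySem.Chars.splitOn.go sep fuel (List.drop sep.length (c :: rest)) [] (cur.reverse :: acc)
      else PySem.Chars.splitOn.go sep fuel rest (c :: cur) acc := by
  rw [PySem.Chars.splitOn.go.eq_def]

theorem pv_headI_tail {α : Type} [Inhabited α] (l : List α) (h : l ≠ []) :
    l.headI :: l.tail = l := by
  cases l with
  | nil => exact absurd rfl h
  | cons a t => rfl

theorem go_eq_pvSplit (sep : List Char) (hs : sep ≠ []) :
    ∀ fuel l cur acc, l.length < fuel →
      PySem.Chars.splitOn.go sep fuel l cur acc =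
        acc.reverse ++ (cur.reverse ++ (pvSplit sep hs l).headI) :: (pvSplit sep hs l).tail := by
  intro fuel
  induction fuel with
  | zero => intro l cur acc h; omega
  | succ f IH =>
    intro l cur acc hlen
    cases l with
    | nil =>
      rw [go_nil]
      rw [pvSplit]
      have : ¬ sep.isPrefixOf ([] : List Char) = true := by
        simp [List.isPrefixOf_iff_prefix, List.prefix_nil, hs]
      simp [this]
    | cons c rest =>
      rw [go_cons]
      by_cases h : sep.isPrefixOf (c :: rest) = true
      · have hslen : 1 ≤ sep.length := List.length_pos_iff.mpr hs
        have hrec : (List.drop sep.length (c :: rest)).length < f := by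
          simp only [List.length_drop]
          simp only [List.length_cons] at hlen ⊢
          omega
        rw [if_pos h, IH _ _ _ hrec]
        conv_rhs => rw [pvSplit, dif_pos h]
        have hne := pvSplit_ne_nil sep hs (List.drop sep.length (c :: rest))
        rw [← pv_headI_tail _ hne]
        simp
      · have hrec : rest.length < f := by
          simp only [List.length_cons] at hlen; omega
        rw [if_neg h, IH _ _ _ hrec]
        conv_rhs => rw [pvSplit, dif_neg h]
        simp

theorem splitOn_eq_pvSplit (sep : List Char) (hs : sep ≠ []) (l : List Char) :
    PySem.Chars.splitOn l sep = pvSplit sep hs l := by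
  show PySem.Chars.splitOn.go sep (l.length + 1) l [] [] = _
  rw [go_eq_pvSplit sep hs (l.length + 1) l [] [] (by omega)]
  simpa using pv_headI_tail _ (pvSplit_ne_nil sep hs l)

theorem pvSplit_no_occ (sep : List Char) (hs : sep ≠ []) (l : List Char)
    (h : ¬ sep <:+: l) : pvSplit sep hs l = [l] := by
  induction l with
  | nil =>
    rw [pvSplit]
    have : ¬ sep.isPrefixOf ([] : List Char) = true := by
      simp [List.isPrefixOf_iff_prefix, List.prefix_nil, hs]
    simp [this]
  | cons c rest IH =>
    have hp : ¬ sep.isPrefixOf (c :: rest) = true := by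
      simp only [List.isPrefixOf_iff_prefix]
      exact fun hpre => h hpre.isInfix
    have hrest : ¬ sep <:+: rest := fun hinf =>
      h (hinf.trans (List.suffix_cons c rest).isInfix)
    rw [pvSplit, dif_neg hp]
    show (c :: (pvSplit sep hs rest).headI) :: (pvSplit sep hs rest).tail = _
    rw [IH hrest]
    rfl

theorem pvSplit_first_occ (sep : List Char) (hs : sep ≠ []) :
    ∀ (j : Nat) (l : List Char), sep <+: List.drop j l → (∀ m < j, ¬ sep <+: List.drop m l) →
      pvSplit sep hs l = (List.take j l) :: pvSplit sep hs (List.drop (j + sep.length) l) := by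
  intro j
  induction j with
  | zero =>
    intro l hocc _
    simp only [List.drop_zero] at hocc
    rw [pvSplit, dif_pos (List.isPrefixOf_iff_prefix.mpr hocc)]
    simp
  | succ j IH =>
    intro l hocc hmin
    cases l with
    | nil =>
      exfalso
      simp only [List.drop_nil] at hocc
      exact hs (List.prefix_nil.mp hocc)
    | cons c rest =>
      have hp : ¬ sep.isPrefixOf (c :: rest) = true := by
        simp only [List.isPrefixOf_iff_prefix]
        exact hmin 0 (Nat.succ_pos j)
      have hocc' : sep <+: List.drop j rest := by
        simpa using hocc
      have hmin' : ∀ m < j, ¬ sep <+: List.drop m rest := by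
        intro m hm
        have := hmin (m+1) (by omega)
        simpa using this
      rw [pvSplit, dif_neg hp]
      show (c :: (pvSplit sep hs rest).headI) :: (pvSplit sep hs rest).tail = _
      rw [IH rest hocc' hmin']
      simp [List.drop_succ_cons, Nat.add_right_comm]

theorem pvSplit_nil (sep : List Char) (hs : sep ≠ []) : pvSplit sep hs [] = [[]] := by
  rw [pvSplit]
  have h : ¬ sep.isPrefixOf ([] : List Char) = true := by
    simp [List.isPrefixOf_iff_prefix, List.prefix_nil, hs]
  simp [h]

theorem pvWalk_cons (sep repl p : List Char) (S : List (List Char)) (hS : S ≠ []) :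
    pvWalk sep repl (p :: S) =
      p ++ (if PySem.Chars.endswith p [']'] then sep else repl) ++ pvWalk sep repl S := by
  cases S with
  | nil => exact absurd rfl hS
  | cons q S' => rfl

theorem endswith_singleton (p : List Char) (x : Char) :
    PySem.Chars.endswith p [x] = true ↔ p.getLast? = some x := by
  rw [PySem.Chars.endswith_iff, List.getLast?_eq_some_iff]
  constructor
  · rintro ⟨u, hu⟩; exact ⟨u, hu.symm⟩
  · rintro ⟨u, hu⟩; exact ⟨u, hu.symm⟩

theorem prefix_getElem? {l₁ l₂ : List Char} (h : l₁ <+: l₂) {i : Nat} (hi : i < l₁.length) :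
    l₂[i]? = l₁[i]? := by
  obtain ⟨u, rfl⟩ := h
  rw [List.getElem?_append_left hi]

-- the main loop lemma: A's find loop from index i computes B's walk of the split of t.drop i
theorem pvFindLoop_eq_walk (t sep repl : List Char) (hs : sep ≠ [])
    (hlast : sep.getLast? ≠ some ']') :
    ∀ fuel i, i ≤ t.length → t.length - i < fuel →
      (i = 0 ∨ t[i-1]? ≠ some ']') →
      pvFindLoop t sep repl fuel i = pvWalk sep repl (pvSplit sep hs (List.drop i t)) := by
  have hslen : 1 ≤ sep.length := List.length_pos_iff.mpr hs
  intro fuel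
  induction fuel with
  | zero => intro i hi hf hprev; omega
  | succ f IH =>
    intro i hi hf hprev
    simp only [pvFindLoop]
    by_cases hlt : i < t.length
    · have hile : i ≤ t.length := le_of_lt hlt
      have hff := PySem.Chars.findFrom_natCast t sep i hile
      rw [if_pos hlt]
      simp only [hff]
      by_cases hfind : PySem.Chars.find (List.drop i t) sep = -1
      · -- no occurrence in the tail: the loop emits t[i:], the split is a single part
        have hno : ¬ sep <:+: List.drop i t := (PySem.Chars.find_eq_neg_one_iff _ _).mp hfind
        rw [pvSplit_no_occ sep hs _ hno, if_pos hfind, if_pos rfl]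
        show PySem.Chars.slice t (some (i : Int)) none = _
        simp [PySem.Chars.slice_eq_listSlice, PySem.List.slice_from t (by positivity : (0:Int) ≤ (i:Int)), pvWalk]
      · -- first occurrence at absolute index i + j
        rw [if_neg hfind]
        have hj0 : 0 ≤ PySem.Chars.find (List.drop i t) sep := by
          have := PySem.Chars.neg_one_le_find (List.drop i t) sep
          omega
        obtain ⟨j, hjcast⟩ : ∃ j : Nat, PySem.Chars.find (List.drop i t) sep = (j : Int) :=
          ⟨(PySem.Chars.find (List.drop i t) sep).toNat, by omega⟩
        obtain ⟨hpre, hmin⟩ := PySem.Chars.find_spec (s := List.drop i t) (sub := sep) hj0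
        rw [hjcast, Int.toNat_natCast] at hpre hmin
        have hslen' : (List.drop i t).length = t.length - i := by simp
        have hjslen : j + sep.length ≤ (List.drop i t).length := by
          have h1 := hpre.length_le
          simp only [List.length_drop] at h1
          have h2 := PySem.Chars.find_le_length (List.drop i t) sep
          rw [hjcast] at h2
          omega
        have hidx : (↑i + PySem.Chars.find (List.drop i t) sep : Int) ≠ -1 := by omega
        rw [if_neg hidx]
        -- the split: first part, then the rest
        have hsplit := pvSplit_first_occ sep hs j (List.drop i t) hpre (fun m hm => hmin m hm)
        rw [hsplit]
        rw [pvWalk_cons _ _ _ _ (pvSplit_ne_nil sep hs _)]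
        -- the boundary character test agrees with endswith of the first part
        have hgetpart : (List.take j (List.drop i t)).getLast? =
            if j = 0 then none else t[i + j - 1]? := by
          by_cases hj : j = 0
          · simp [hj]
          · rw [List.getLast?_eq_getElem?]
            have hlen : (List.take j (List.drop i t)).length = j := by
              simp; omega
            rw [hlen, List.getElem?_take, if_pos (by omega : j - 1 < j), List.getElem?_drop,
              if_neg hj]
            congr 1
            omega
        have hcond : (0 < (↑i + PySem.Chars.find (List.drop i t) sep : Int) &&
            (PySem.Chars.pyGet? t ((↑i + PySem.Chars.find (List.drop i t) sep) - 1) == some ']')) =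
            PySem.Chars.endswith (List.take j (List.drop i t)) [']'] := by
          rw [hjcast]
          by_cases hj : j = 0
          · subst hj
            rw [List.take_zero]
            have hend : PySem.Chars.endswith ([] : List Char) [']'] = false := by decide
            rw [hend]
            by_cases hi0 : i = 0
            · subst hi0; simp
            · have hne : t[i-1]? ≠ some ']' := hprev.resolve_left hi0
              have hcast : ((i : Int) + (0:Nat) - 1) = ((i - 1 : Nat) : Int) := by omega
              rw [hcast, PySem.Chars.pyGet?_eq_listPyGet?, PySem.List.pyGet?_natCast]
              have hb : (t[i-1]? == some ']') = false := by simpa using hne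
              simp [hb]
          · have hget : (List.take j (List.drop i t)).getLast? = t[i + j - 1]? := by
              rw [hgetpart, if_neg hj]
            have hcast : ((i : Int) + (j : Nat) - 1) = ((i + j - 1 : Nat) : Int) := by omega
            rw [hcast, PySem.Chars.pyGet?_eq_listPyGet?, PySem.List.pyGet?_natCast]
            by_cases hch : t[i+j-1]? = some ']'
            · have h1 : (t[i+j-1]? == some ']') = true := by simp [hch]
              have h2 : PySem.Chars.endswith (List.take j (List.drop i t)) [']'] = true :=
                (endswith_singleton _ _).mpr (by rw [hget, hch])
              rw [h1, h2, Bool.and_true]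
              simp only [decide_eq_true_eq]
              omega
            · have h1 : (t[i+j-1]? == some ']') = false := by simpa using hch
              have h2 : PySem.Chars.endswith (List.take j (List.drop i t)) [']'] = false :=
                Bool.eq_false_iff.mpr fun hE =>
                  hch (by rw [← hget]; exact (endswith_singleton _ _).mp hE)
              simp [h1, h2]
        rw [hcond]
        -- the recursive call matches the walk of the remaining parts
        have hlastchar : t[i + j + sep.length - 1]? = sep.getLast? := by
          have h1 : t[i + j + sep.length - 1]? = (List.drop (i + j) t)[sep.length - 1]? := by
            rw [List.getElem?_drop]
            congr 1
            omega
          have h2 : List.drop (i + j) t = List.drop j (List.drop i t) := by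
            rw [List.drop_drop, Nat.add_comm]
          rw [h1, h2, prefix_getElem? hpre (by omega), List.getLast?_eq_getElem?]
        have hdd : List.drop (j + sep.length) (List.drop i t) =
            List.drop (i + j + sep.length) t := by
          rw [List.drop_drop, ← Nat.add_assoc]
        have hrec : pvFindLoop t sep repl f ((↑i + (j : Int) + ↑sep.length).toNat) =
            pvWalk sep repl (pvSplit sep hs (List.drop (j + sep.length) (List.drop i t))) := by
          have htn : ((↑i + (j : Int) + ↑sep.length).toNat) = i + j + sep.length := by omega
          rw [htn, hdd]
          exact IH (i + j + sep.length) (by omega) (by omega)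
            (Or.inr (by rw [hlastchar]; exact hlast))
        rw [hjcast, hrec]
        -- both emitted pieces agree
        by_cases hcase : PySem.Chars.endswith (List.take j (List.drop i t)) [']'] = true
        · rw [if_pos hcase, if_pos hcase]
          have hslice : PySem.Chars.slice t (some (↑i : Int)) (some (↑i + (j:Int) + ↑sep.length)) =
              List.take j (List.drop i t) ++ sep := by
            have hcast : (↑i + (j:Int) + ↑sep.length) = ((i + j + sep.length : Nat) : Int) := by
              push_cast; ring
            rw [PySem.Chars.slice_eq_listSlice, hcast, PySem.List.slice_natCast]
            have : i + j + sep.length - i = j + sep.length := by omega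
            rw [this, List.take_add]
            congr 1
            exact ((List.prefix_iff_eq_take.mp hpre)).symm
          rw [hslice, List.append_assoc]
        · rw [if_neg hcase, if_neg hcase]
          have hslice : PySem.Chars.slice t (some (↑i : Int)) (some (↑i + (j:Int))) =
              List.take j (List.drop i t) := by
            have hcast : (↑i + (j:Int)) = ((i + j : Nat) : Int) := by push_cast; ring
            rw [PySem.Chars.slice_eq_listSlice, hcast, PySem.List.slice_natCast]
            norm_num
          rw [hslice]
    · -- i = len(t): the loop stops; the remaining suffix splits into one empty part
      have : i = t.length := by omega
      subst this
      rw [if_neg hlt, List.drop_length, pvSplit_nil]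
      rfl

theorem safeReplace_eq (t search repl : String) (hs : search.toList ≠ [])
    (hlast : search.toList.getLast? ≠ some ']') :
    pvSafeReplaceA t search repl = pvSafeReplaceAlt t search repl := by
  unfold pvSafeReplaceA pvSafeReplaceAlt
  have hsplit? : PySem.Str.split? t search =
      some ((PySem.Chars.splitOn t.toList search.toList).map String.ofList) := by
    unfold PySem.Str.split? PySem.Chars.split?
    rw [if_neg (by simp [List.isEmpty_iff, hs])]
    rfl
  rw [hsplit?]
  show String.ofList _ = String.ofList _
  rw [pvFindLoop_eq_walk t.toList search.toList repl.toList hs hlast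
    (t.toList.length + 1) 0 (by omega) (by omega) (Or.inl rfl)]
  rw [List.drop_zero, List.map_map]
  congr 1
  rw [splitOn_eq_pvSplit search.toList hs t.toList]
  simp [Function.comp_def]

theorem step_eq (result : String) (old new : String) :
    (let r1 := pvSafeReplaceA result ("'" ++ old ++ "'!") ("'" ++ new ++ "'!")
     if !PySem.Str.isIn " " old
         && !("![\\'".toList.any fun c => PySem.Chars.isIn [c] old.toList) then
       if PySem.Str.isIn " " new
           || ("![]''\\\"<>*+".toList.any fun c => PySem.Chars.isIn [c] new.toList) then
         pvSafeReplaceA r1 (old ++ "!") ("'" ++ new ++ "'!")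
       else
         pvSafeReplaceA r1 (old ++ "!") (new ++ "!")
     else r1) =
    (pvReplacementPairs old new).foldl (fun r q => pvSafeReplaceAlt r q.1 q.2) result := by
  have hq : ∀ (o n : String) (r : String),
      pvSafeReplaceA r ("'" ++ o ++ "'!") ("'" ++ n ++ "'!") =
        pvSafeReplaceAlt r ("'" ++ o ++ "'!") ("'" ++ n ++ "'!") := by
    intro o n r
    apply safeReplace_eq
    · simp [String.toList_append]
    · have h : ("'" ++ o ++ "'!").toList = ('\'' :: o.toList) ++ ['\'', '!'] := by
        simp [String.toList_append]
      rw [h, List.getLast?_append]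
      simp
  have hb1 : ∀ (o n : String) (r : String),
      pvSafeReplaceA r (o ++ "!") ("'" ++ n ++ "'!") =
        pvSafeReplaceAlt r (o ++ "!") ("'" ++ n ++ "'!") := by
    intro o n r
    apply safeReplace_eq
    · simp [String.toList_append]
    · simp [String.toList_append, List.getLast?_append]
  have hb2 : ∀ (o n : String) (r : String),
      pvSafeReplaceA r (o ++ "!") (n ++ "!") = pvSafeReplaceAlt r (o ++ "!") (n ++ "!") := by
    intro o n r
    apply safeReplace_eq
    · simp [String.toList_append]
    · simp [String.toList_append, List.getLast?_append]
  unfold pvReplacementPairs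
  rw [show (" ![\\\'".toList.any fun c => PySem.Chars.isIn [c] old.toList)
      = (PySem.Str.isIn " " old || ("![\\\'".toList.any fun c => PySem.Chars.isIn [c] old.toList))
      from rfl]
  rw [show (" ![]''\\\"<>*+".toList.any fun c => PySem.Chars.isIn [c] new.toList)
      = (PySem.Str.isIn " " new
          || ("![]''\\\"<>*+".toList.any fun c => PySem.Chars.isIn [c] new.toList)) from rfl]
  rw [Bool.not_or]
  cases hc : (!PySem.Str.isIn " " old
      && !("![\\\'".toList.any fun c => PySem.Chars.isIn [c] old.toList)) with
  | false =>
    simp only [if_false, Bool.false_eq_true, List.foldl_cons, List.foldl_nil]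
    exact hq old new result
  | true =>
    simp only [if_true]
    cases hn : (PySem.Str.isIn " " new
        || ("![]''\\\"<>*+".toList.any fun c => PySem.Chars.isIn [c] new.toList)) with
    | true =>
      simp only [if_true, List.cons_append, List.nil_append,
        List.foldl_cons, List.foldl_nil]
      rw [hq old new result, hb1 old new]
    | false =>
      simp only [Bool.false_eq_true, if_false, List.cons_append, List.nil_append,
        List.foldl_cons, List.foldl_nil]
      rw [hq old new result, hb2 old new]

-- ===== VERDICT (by name: the statement is the Claim_ definition above) =====
theorem fix_formula_sheet_refs_py_spec : Claim_equal_fix_formula_sheet_refs_py := by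
  intro formula_text sheet_name_map _
  unfold Spec_fix_formula_sheet_refs_py
  unfold fix_formula_sheet_refs_py fix_formula_sheet_refs_py_alt
  apply List.foldl_ext
  intro r p _
  exact step_eq r p.1 p.2
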